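-- pv_equiv track=rewrite | github.com/hoon-923/BOJ | 14. 동적 계획법/9184/[9184번]_신나는_함수_실행.py | BOJ_9184
-- ===== SOURCE A (Python) =====
-- def BOJ_9184(a,b,c):
--
-- 	if a<=0 or b<=0 or c<=0:
-- 		return 1
-- 	elif a>20 or b>20 or c>20:
-- 		return BOJ_9184(20,20,20)
--
-- 	if dp[a][b][c]:
-- 		return dp[a][b][c]
--
-- 	if a<b and b<c:
-- 		dp[a][b][c] = BOJ_9184(a, b, c-1) + BOJ_9184(a, b-1, c-1) - BOJ_9184(a, b-1, c)
-- 	else: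
-- 		dp[a][b][c] = BOJ_9184(a-1, b, c) + BOJ_9184(a-1, b-1, c) + BOJ_9184(a-1, b, c-1) - BOJ_9184(a-1, b-1, c-1)
-- 	return dp[a][b][c]
--
-- dp = [[[0 for _ in range(21)] for _ in range(21)] for _ in range(21)]
-- ===== SOURCE B (Python) =====
-- def BOJ_9184(a, b, c):
--     if a <= 0 or b <= 0 or c <= 0:
--         return 1
--     if a > 20 or b > 20 or c > 20:
--         a = b = c = 20
--     table = {}
--     triples = [(i, j, k) for i in range(1, 21) for j in range(1, 21) for k in range(1, 21)]
--     for (i, j, k) in triples: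
--         if i < j and j < k:
--             table[(i, j, k)] = table.get((i, j, k - 1), 1) + table.get((i, j - 1, k - 1), 1) - table.get((i, j - 1, k), 1)
--         else:
--             table[(i, j, k)] = table.get((i - 1, j, k), 1) + table.get((i - 1, j - 1, k), 1) + table.get((i - 1, j, k - 1), 1) - table.get((i - 1, j - 1, k - 1), 1)
--     return table.get((a, b, c), 1)
-- ===== Notes on version B (the rewrite author's own statement) =====
-- stated objective: alternative
-- what changed: Replaced the top-down memoized recursion over a global 21x21x21 table by an iterative bottom-up tabulation: one pass fills a dict over (i,j,k) in 1..20 in lexicographic order using the same two-branch recurrence, and the function itself only handles the boundary/clamp cases and a single table lookup.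
import Mathlib
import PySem

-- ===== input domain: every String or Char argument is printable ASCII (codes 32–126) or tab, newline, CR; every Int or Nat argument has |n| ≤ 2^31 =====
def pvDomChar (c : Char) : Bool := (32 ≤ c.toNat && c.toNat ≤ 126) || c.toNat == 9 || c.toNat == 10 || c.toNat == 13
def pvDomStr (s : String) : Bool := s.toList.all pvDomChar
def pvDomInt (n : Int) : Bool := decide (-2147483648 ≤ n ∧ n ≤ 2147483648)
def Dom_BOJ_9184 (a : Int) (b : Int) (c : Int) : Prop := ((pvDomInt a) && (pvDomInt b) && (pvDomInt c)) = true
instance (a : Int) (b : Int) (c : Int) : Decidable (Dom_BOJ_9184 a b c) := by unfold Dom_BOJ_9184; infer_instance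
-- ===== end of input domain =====

-- B replaces A's top-down memoized recursion by an iterative bottom-up tabulation of the
-- same recurrence (objective: alternative; equivalence of the return values is proved).

-- ===== PORT A =====
-- A's global memo list dp (zeros = "not yet computed") is threaded explicitly as a dict
-- with default 0, and the recursion carries a fuel counter as a pure totality guard
-- (200 always suffices: arguments are clamped to at most (20,20,20) before recursing);
-- the recursion is otherwise A's code line for line.
def pvGoA : Nat → PySem.Dict (Int × Int × Int) Int → Int → Int → Int →
    Int × PySem.Dict (Int × Int × Int) Int
  | 0, d, _, _, _ => (0, d)  -- never reached with fuel ≥ 200 (proved below)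
  | fuel + 1, d, a, b, c =>
    if a ≤ 0 ∨ b ≤ 0 ∨ c ≤ 0 then (1, d)
    else if a > 20 ∨ b > 20 ∨ c > 20 then pvGoA fuel d 20 20 20
    else if d.getD (a, b, c) 0 ≠ 0 then (d.getD (a, b, c) 0, d)
    else if a < b ∧ b < c then
      let r1 := pvGoA fuel d a b (c - 1)
      let r2 := pvGoA fuel r1.2 a (b - 1) (c - 1)
      let r3 := pvGoA fuel r2.2 a (b - 1) c
      let v := r1.1 + r2.1 - r3.1
      (v, r3.2.insert (a, b, c) v)
    else
      let r1 := pvGoA fuel d (a - 1) b c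
      let r2 := pvGoA fuel r1.2 (a - 1) (b - 1) c
      let r3 := pvGoA fuel r2.2 (a - 1) b (c - 1)
      let r4 := pvGoA fuel r3.2 (a - 1) (b - 1) (c - 1)
      let v := r1.1 + r2.1 + r3.1 - r4.1
      (v, r4.2.insert (a, b, c) v)

def BOJ_9184 (a : Int) (b : Int) (c : Int) : Int :=
  (pvGoA 200 PySem.Dict.empty a b c).1

-- ===== PORT B =====
def pvTriples : List (Int × Int × Int) :=
  (PySem.List.pyRange 1 21 1).flatMap (fun i =>
    (PySem.List.pyRange 1 21 1).flatMap (fun j =>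
      (PySem.List.pyRange 1 21 1).map (fun k => (i, j, k))))

def pvStepB (d : PySem.Dict (Int × Int × Int) Int) (t : Int × Int × Int) :
    PySem.Dict (Int × Int × Int) Int :=
  let i := t.1; let j := t.2.1; let k := t.2.2
  if i < j ∧ j < k then
    d.insert (i, j, k) (d.getD (i, j, k - 1) 1 + d.getD (i, j - 1, k - 1) 1 - d.getD (i, j - 1, k) 1)
  else
    d.insert (i, j, k) (d.getD (i - 1, j, k) 1 + d.getD (i - 1, j - 1, k) 1 +
      d.getD (i - 1, j, k - 1) 1 - d.getD (i - 1, j - 1, k - 1) 1)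

def BOJ_9184_alt (a : Int) (b : Int) (c : Int) : Int :=
  if a ≤ 0 ∨ b ≤ 0 ∨ c ≤ 0 then 1
  else
    let q : Int × Int × Int := if a > 20 ∨ b > 20 ∨ c > 20 then (20, 20, 20) else (a, b, c)
    let table := pvTriples.foldl pvStepB PySem.Dict.empty
    table.getD q 1

-- ===== PRECONDITION & SPEC =====
def Spec_BOJ_9184 (a : Int) (b : Int) (c : Int) (out : Int) : Prop := out = BOJ_9184_alt a b c
instance (a : Int) (b : Int) (c : Int) (out : Int) : Decidable (Spec_BOJ_9184 a b c out) := by unfold Spec_BOJ_9184; infer_instance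

-- ===== CLAIM (what is proved, stated in full; the proofs are below) =====
def Claim_equal_BOJ_9184 : Prop := ∀ (a : Int) (b : Int) (c : Int), Dom_BOJ_9184 a b c → Spec_BOJ_9184 a b c (BOJ_9184 a b c)

-- ===== LEMMAS AND PROOFS =====

-- the mathematical recurrence both programs tabulate
def wP (a b c : Nat) : Int :=
  if a = 0 ∨ b = 0 ∨ c = 0 then 1
  else if a < b ∧ b < c then
    wP a b (c - 1) + wP a (b - 1) (c - 1) - wP a (b - 1) c
  else
    wP (a - 1) b c + wP (a - 1) (b - 1) c + wP (a - 1) b (c - 1) - wP (a - 1) (b - 1) (c - 1)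
termination_by a + b + c
decreasing_by all_goals omega

lemma wP_base {a b c : Nat} (h : a = 0 ∨ b = 0 ∨ c = 0) : wP a b c = 1 := by
  rw [wP]; simp [h]

lemma wP_step_lt {a b c : Int} (ha : 1 ≤ a) (hb : 1 ≤ b) (hc : 1 ≤ c) (hbr : a < b ∧ b < c) :
    wP a.toNat b.toNat c.toNat =
      wP a.toNat b.toNat (c - 1).toNat + wP a.toNat (b - 1).toNat (c - 1).toNat -
        wP a.toNat (b - 1).toNat c.toNat := by
  rw [wP, if_neg (by omega), if_pos (by constructor <;> omega)]
  have ec : c.toNat - 1 = (c - 1).toNat := by omega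
  have eb : b.toNat - 1 = (b - 1).toNat := by omega
  rw [ec, eb]

lemma wP_step_ge {a b c : Int} (ha : 1 ≤ a) (hb : 1 ≤ b) (hc : 1 ≤ c) (hbr : ¬(a < b ∧ b < c)) :
    wP a.toNat b.toNat c.toNat =
      wP (a - 1).toNat b.toNat c.toNat + wP (a - 1).toNat (b - 1).toNat c.toNat +
        wP (a - 1).toNat b.toNat (c - 1).toNat - wP (a - 1).toNat (b - 1).toNat (c - 1).toNat := by
  rw [wP, if_neg (by omega), if_neg (by omega)]
  have ea : a.toNat - 1 = (a - 1).toNat := by omega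
  have eb : b.toNat - 1 = (b - 1).toNat := by omega
  have ec : c.toNat - 1 = (c - 1).toNat := by omega
  rw [ea, eb, ec]

-- the common specification value
def specVal (a b c : Int) : Int :=
  if a ≤ 0 ∨ b ≤ 0 ∨ c ≤ 0 then 1
  else if a > 20 ∨ b > 20 ∨ c > 20 then wP 20 20 20
  else wP a.toNat b.toNat c.toNat

lemma specVal_eq_wP {a b c : Int} (ha : a ≤ 20) (hb : b ≤ 20) (hc : c ≤ 20) :
    specVal a b c = wP a.toNat b.toNat c.toNat := by
  unfold specVal
  by_cases h : a ≤ 0 ∨ b ≤ 0 ∨ c ≤ 0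
  · rw [if_pos h, wP_base (by omega)]
  · rw [if_neg h, if_neg (by omega)]

-- ---------- A-side: the memoized recursion computes specVal ----------

def DictOK (d : PySem.Dict (Int × Int × Int) Int) : Prop :=
  ∀ i j k v, d.get? (i, j, k) = some v → v = wP i.toNat j.toNat k.toNat

lemma dictOK_insert {d : PySem.Dict (Int × Int × Int) Int} (h : DictOK d)
    {i j k : Int} {v : Int} (hv : v = wP i.toNat j.toNat k.toNat) :
    DictOK (d.insert (i, j, k) v) := by
  intro i' j' k' v' hget
  rw [PySem.Dict.get?_insert] at hget
  split at hget
  · rename_i heq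
    simp only [Prod.mk.injEq] at heq
    obtain ⟨h1, h2, h3⟩ := heq
    subst h1; subst h2; subst h3
    cases hget; exact hv
  · exact h _ _ _ _ hget

lemma memo_hit {d : PySem.Dict (Int × Int × Int) Int} (hd : DictOK d)
    {i j k : Int} (h : d.getD (i, j, k) 0 ≠ 0) :
    d.getD (i, j, k) 0 = wP i.toNat j.toNat k.toNat := by
  rcases hq : d.get? (i, j, k) with _ | v
  · exact absurd (by rw [PySem.Dict.getD_eq_get?_getD, hq]; rfl) h
  · rw [PySem.Dict.getD_eq_get?_getD, hq]
    exact hd _ _ _ _ hq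

def pvMu (a b c : Int) : Nat :=
  (if a > 20 ∨ b > 20 ∨ c > 20 then 100 else 0) +
    (min a.toNat 20 + min b.toNat 20 + min c.toNat 20)

lemma mu_lt {a b c a' b' c' : Int} (h2 : ¬(a > 20 ∨ b > 20 ∨ c > 20))
    (hb : 0 ≤ a' ∧ a' ≤ a ∧ 0 ≤ b' ∧ b' ≤ b ∧ 0 ≤ c' ∧ c' ≤ c)
    (hs : a' + b' + c' < a + b + c) : pvMu a' b' c' < pvMu a b c := by
  unfold pvMu; split_ifs <;> omega

lemma pvGoA_correct : ∀ (fuel : Nat) (d : PySem.Dict (Int × Int × Int) Int) (a b c : Int),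
    pvMu a b c < fuel → DictOK d →
    (pvGoA fuel d a b c).1 = specVal a b c ∧ DictOK (pvGoA fuel d a b c).2 := by
  intro fuel
  induction fuel with
  | zero => intro d a b c h; exact absurd h (by omega)
  | succ fuel ih =>
    intro d a b c hmu hd
    rw [pvGoA]
    by_cases h1 : a ≤ 0 ∨ b ≤ 0 ∨ c ≤ 0
    · rw [if_pos h1]
      exact ⟨by simp [specVal, h1], hd⟩
    · rw [if_neg h1]
      by_cases h2 : a > 20 ∨ b > 20 ∨ c > 20
      · rw [if_pos h2]
        have hmu' : pvMu 20 20 20 < fuel := by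
          unfold pvMu at hmu ⊢; split_ifs at hmu ⊢ <;> omega
        obtain ⟨e, hdo⟩ := ih d 20 20 20 hmu' hd
        refine ⟨?_, hdo⟩
        rw [e, specVal_eq_wP (by norm_num) (by norm_num) (by norm_num)]
        unfold specVal
        rw [if_neg h1, if_pos h2]
        rfl
      · rw [if_neg h2]
        by_cases hv0 : d.getD (a, b, c) 0 ≠ 0
        · rw [if_pos hv0]
          refine ⟨?_, hd⟩
          show d.getD (a, b, c) 0 = specVal a b c
          rw [memo_hit hd hv0, specVal_eq_wP (by omega) (by omega) (by omega)]
        · rw [if_neg hv0]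
          by_cases hbr : a < b ∧ b < c
          · rw [if_pos hbr]
            simp only []
            have hf1 : pvMu a b (c - 1) < fuel :=
              lt_of_lt_of_le (mu_lt h2 (by omega) (by omega)) (by omega)
            have hf2 : pvMu a (b - 1) (c - 1) < fuel :=
              lt_of_lt_of_le (mu_lt h2 (by omega) (by omega)) (by omega)
            have hf3 : pvMu a (b - 1) c < fuel :=
              lt_of_lt_of_le (mu_lt h2 (by omega) (by omega)) (by omega)
            obtain ⟨e1, hd1⟩ := ih d a b (c - 1) hf1 hd
            obtain ⟨e2, hd2⟩ := ih (pvGoA fuel d a b (c - 1)).2 a (b - 1) (c - 1) hf2 hd1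
            obtain ⟨e3, hd3⟩ := ih (pvGoA fuel (pvGoA fuel d a b (c - 1)).2 a (b - 1) (c - 1)).2
              a (b - 1) c hf3 hd2
            have hval : (pvGoA fuel d a b (c - 1)).1 +
                (pvGoA fuel (pvGoA fuel d a b (c - 1)).2 a (b - 1) (c - 1)).1 -
                (pvGoA fuel (pvGoA fuel (pvGoA fuel d a b (c - 1)).2 a (b - 1) (c - 1)).2
                  a (b - 1) c).1 = specVal a b c := by
              rw [e1, e2, e3,
                specVal_eq_wP (by omega) (by omega) (by omega),
                specVal_eq_wP (by omega) (by omega) (by omega),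
                specVal_eq_wP (by omega) (by omega) (by omega),
                specVal_eq_wP (by omega) (by omega) (by omega),
                wP_step_lt (by omega) (by omega) (by omega) hbr]
            refine ⟨hval, dictOK_insert hd3 ?_⟩
            rw [hval, specVal_eq_wP (by omega) (by omega) (by omega)]
          · rw [if_neg hbr]
            simp only []
            have hf1 : pvMu (a - 1) b c < fuel :=
              lt_of_lt_of_le (mu_lt h2 (by omega) (by omega)) (by omega)
            have hf2 : pvMu (a - 1) (b - 1) c < fuel :=
              lt_of_lt_of_le (mu_lt h2 (by omega) (by omega)) (by omega)
            have hf3 : pvMu (a - 1) b (c - 1) < fuel :=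
              lt_of_lt_of_le (mu_lt h2 (by omega) (by omega)) (by omega)
            have hf4 : pvMu (a - 1) (b - 1) (c - 1) < fuel :=
              lt_of_lt_of_le (mu_lt h2 (by omega) (by omega)) (by omega)
            obtain ⟨e1, hd1⟩ := ih d (a - 1) b c hf1 hd
            obtain ⟨e2, hd2⟩ := ih (pvGoA fuel d (a - 1) b c).2 (a - 1) (b - 1) c hf2 hd1
            obtain ⟨e3, hd3⟩ := ih (pvGoA fuel (pvGoA fuel d (a - 1) b c).2 (a - 1) (b - 1) c).2
              (a - 1) b (c - 1) hf3 hd2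
            obtain ⟨e4, hd4⟩ := ih (pvGoA fuel (pvGoA fuel (pvGoA fuel d (a - 1) b c).2
              (a - 1) (b - 1) c).2 (a - 1) b (c - 1)).2 (a - 1) (b - 1) (c - 1) hf4 hd3
            have hval : (pvGoA fuel d (a - 1) b c).1 +
                (pvGoA fuel (pvGoA fuel d (a - 1) b c).2 (a - 1) (b - 1) c).1 +
                (pvGoA fuel (pvGoA fuel (pvGoA fuel d (a - 1) b c).2 (a - 1) (b - 1) c).2
                  (a - 1) b (c - 1)).1 -
                (pvGoA fuel (pvGoA fuel (pvGoA fuel (pvGoA fuel d (a - 1) b c).2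
                  (a - 1) (b - 1) c).2 (a - 1) b (c - 1)).2 (a - 1) (b - 1) (c - 1)).1 =
                specVal a b c := by
              rw [e1, e2, e3, e4,
                specVal_eq_wP (by omega) (by omega) (by omega),
                specVal_eq_wP (by omega) (by omega) (by omega),
                specVal_eq_wP (by omega) (by omega) (by omega),
                specVal_eq_wP (by omega) (by omega) (by omega),
                specVal_eq_wP (by omega) (by omega) (by omega),
                wP_step_ge (by omega) (by omega) (by omega) hbr]
            refine ⟨hval, dictOK_insert hd4 ?_⟩
            rw [hval, specVal_eq_wP (by omega) (by omega) (by omega)]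

-- ---------- B-side: the tabulation loop fills the table with wP ----------

def pvPos (i j k : Int) : Int := (i - 1) * 400 + (j - 1) * 20 + (k - 1)

def InvB (n : Int) (d : PySem.Dict (Int × Int × Int) Int) : Prop :=
  ∀ i j k : Int, d.getD (i, j, k) 1 =
    if (1 ≤ i ∧ i ≤ 20 ∧ 1 ≤ j ∧ j ≤ 20 ∧ 1 ≤ k ∧ k ≤ 20) ∧ pvPos i j k < n
    then wP i.toNat j.toNat k.toNat else 1

lemma getD_of_InvB {n : Int} {d} (h : InvB n d) (i j k : Int)
    (hb : 0 ≤ i ∧ i ≤ 20 ∧ 0 ≤ j ∧ j ≤ 20 ∧ 0 ≤ k ∧ k ≤ 20)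
    (hp : 1 ≤ i → 1 ≤ j → 1 ≤ k → pvPos i j k < n) :
    d.getD (i, j, k) 1 = wP i.toNat j.toNat k.toNat := by
  rw [h]
  by_cases hr : 1 ≤ i ∧ 1 ≤ j ∧ 1 ≤ k
  · rw [if_pos ⟨by omega, hp hr.1 hr.2.1 hr.2.2⟩]
  · rw [if_neg (by tauto), wP_base (by omega)]

lemma stepB {d} {p q r : Int}
    (hrange : 1 ≤ p ∧ p ≤ 20 ∧ 1 ≤ q ∧ q ≤ 20 ∧ 1 ≤ r ∧ r ≤ 20)
    (h : InvB (pvPos p q r) d) : InvB (pvPos p q r + 1) (pvStepB d (p, q, r)) := by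
  intro i j k
  have hread : ∀ i' j' k' : Int, 0 ≤ i' ∧ i' ≤ 20 ∧ 0 ≤ j' ∧ j' ≤ 20 ∧ 0 ≤ k' ∧ k' ≤ 20 →
      pvPos i' j' k' < pvPos p q r →
      d.getD (i', j', k') 1 = wP i'.toNat j'.toNat k'.toNat := by
    intro i' j' k' hb hlt
    exact getD_of_InvB h i' j' k' hb (fun _ _ _ => hlt)
  have key : ∀ v : Int, v = wP p.toNat q.toNat r.toNat →
      (d.insert (p, q, r) v).getD (i, j, k) 1 =
        if (1 ≤ i ∧ i ≤ 20 ∧ 1 ≤ j ∧ j ≤ 20 ∧ 1 ≤ k ∧ k ≤ 20) ∧ pvPos i j k < pvPos p q r + 1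
        then wP i.toNat j.toNat k.toNat else 1 := by
    intro v hv
    rw [PySem.Dict.getD_insert]
    by_cases heq : (i, j, k) = ((p, q, r) : Int × Int × Int)
    · rw [if_pos heq]
      have e1 : i = p := congrArg (·.1) heq
      have e2 : j = q := congrArg (·.2.1) heq
      have e3 : k = r := congrArg (·.2.2) heq
      rw [if_pos ⟨by rw [e1, e2, e3]; exact hrange, by rw [e1, e2, e3]; omega⟩,
        hv, e1, e2, e3]
    · rw [if_neg heq, h i j k]
      by_cases hc : (1 ≤ i ∧ i ≤ 20 ∧ 1 ≤ j ∧ j ≤ 20 ∧ 1 ≤ k ∧ k ≤ 20) ∧ pvPos i j k < pvPos p q r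
      · rw [if_pos hc, if_pos ⟨hc.1, by omega⟩]
      · rw [if_neg hc, if_neg ?_]
        rintro ⟨hbs, hlt⟩
        apply hc
        refine ⟨hbs, ?_⟩
        have hne : ¬(i = p ∧ j = q ∧ k = r) := by
          intro ⟨e1, e2, e3⟩; exact heq (by rw [e1, e2, e3])
        unfold pvPos at *
        omega
  unfold pvStepB
  simp only []
  by_cases hbr : p < q ∧ q < r
  · rw [if_pos hbr]
    apply key
    rw [hread p q (r - 1) (by omega) (by unfold pvPos; omega),
      hread p (q - 1) (r - 1) (by omega) (by unfold pvPos; omega),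
      hread p (q - 1) r (by omega) (by unfold pvPos; omega),
      wP_step_lt (by omega) (by omega) (by omega) hbr]
  · rw [if_neg hbr]
    apply key
    rw [hread (p - 1) q r (by omega) (by unfold pvPos; omega),
      hread (p - 1) (q - 1) r (by omega) (by unfold pvPos; omega),
      hread (p - 1) q (r - 1) (by omega) (by unfold pvPos; omega),
      hread (p - 1) (q - 1) (r - 1) (by omega) (by unfold pvPos; omega),
      wP_step_ge (by omega) (by omega) (by omega) hbr]

lemma invB_congr {n n' : Int} {d} (h : InvB n d) (e : n = n') : InvB n' d := e ▸ h

lemma pyRange_21_nil : PySem.List.pyRange 21 21 1 = [] := by decide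

lemma innerB (i j : Int) (hij : 1 ≤ i ∧ i ≤ 20 ∧ 1 ≤ j ∧ j ≤ 20) :
    ∀ (m : Nat) (k0 : Int), k0 + m = 21 → 1 ≤ k0 → ∀ d, InvB (pvPos i j k0) d →
    InvB (pvPos i j 21)
      (List.foldl pvStepB d ((PySem.List.pyRange k0 21 1).map (fun k => (i, j, k)))) := by
  intro m
  induction m with
  | zero =>
      intro k0 he hk d h
      have : k0 = 21 := by omega
      subst this
      rw [pyRange_21_nil]
      exact h
  | succ m ih =>
      intro k0 he hk d h
      rw [PySem.List.pyRange_one_cons (by omega), List.map_cons, List.foldl_cons]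
      have hstep := stepB (p := i) (q := j) (r := k0) (by omega) h
      exact ih (k0 + 1) (by omega) (by omega) _
        (invB_congr hstep (by unfold pvPos; ring))

lemma middleB (i : Int) (hi : 1 ≤ i ∧ i ≤ 20) :
    ∀ (m : Nat) (j0 : Int), j0 + m = 21 → 1 ≤ j0 → ∀ d, InvB (pvPos i j0 1) d →
    InvB (pvPos i 21 1)
      (List.foldl pvStepB d ((PySem.List.pyRange j0 21 1).flatMap (fun j =>
        (PySem.List.pyRange 1 21 1).map (fun k => (i, j, k))))) := by
  intro m
  induction m with
  | zero =>
      intro j0 he hj d h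
      have : j0 = 21 := by omega
      subst this
      rw [pyRange_21_nil]
      exact h
  | succ m ih =>
      intro j0 he hj d h
      rw [show PySem.List.pyRange j0 21 1 = j0 :: PySem.List.pyRange (j0 + 1) 21 1 from
        PySem.List.pyRange_one_cons (by omega), List.flatMap_cons, List.foldl_append]
      have hin := innerB i j0 (by omega) 20 1 (by omega) (by omega) d
        (invB_congr h (by unfold pvPos; ring))
      exact ih (j0 + 1) (by omega) (by omega) _
        (invB_congr hin (by unfold pvPos; ring))

lemma outerB :
    ∀ (m : Nat) (i0 : Int), i0 + m = 21 → 1 ≤ i0 → ∀ d, InvB (pvPos i0 1 1) d →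
    InvB (pvPos 21 1 1)
      (List.foldl pvStepB d ((PySem.List.pyRange i0 21 1).flatMap (fun i =>
        (PySem.List.pyRange 1 21 1).flatMap (fun j =>
          (PySem.List.pyRange 1 21 1).map (fun k => (i, j, k)))))) := by
  intro m
  induction m with
  | zero =>
      intro i0 he hi d h
      have : i0 = 21 := by omega
      subst this
      rw [pyRange_21_nil]
      exact h
  | succ m ih =>
      intro i0 he hi d h
      rw [show PySem.List.pyRange i0 21 1 = i0 :: PySem.List.pyRange (i0 + 1) 21 1 from
        PySem.List.pyRange_one_cons (by omega), List.flatMap_cons, List.foldl_append]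
      have hmid := middleB i0 (by omega) 20 1 (by omega) (by omega) d h
      exact ih (i0 + 1) (by omega) (by omega) _
        (invB_congr hmid (by unfold pvPos; ring))

lemma tableB : InvB 8000 (pvTriples.foldl pvStepB PySem.Dict.empty) := by
  have h0 : InvB (pvPos 1 1 1) PySem.Dict.empty := by
    intro i j k
    rw [PySem.Dict.getD_empty, if_neg]
    rintro ⟨hbs, hlt⟩
    unfold pvPos at hlt
    omega
  have := outerB 20 1 (by omega) (by omega) PySem.Dict.empty h0
  exact invB_congr this (by unfold pvPos; ring)

lemma alt_eq_specVal (a b c : Int) : BOJ_9184_alt a b c = specVal a b c := by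
  unfold BOJ_9184_alt specVal
  by_cases h1 : a ≤ 0 ∨ b ≤ 0 ∨ c ≤ 0
  · simp [h1]
  · rw [if_neg h1, if_neg h1]
    have ht := tableB
    by_cases h2 : a > 20 ∨ b > 20 ∨ c > 20
    · simp only [if_pos h2]
      rw [ht 20 20 20, if_pos ⟨by omega, by unfold pvPos; omega⟩]
      rfl
    · simp only [if_neg h2]
      rw [ht a b c, if_pos ⟨by omega, by unfold pvPos; omega⟩]

-- ===== VERDICT (by name: the statement is the Claim_ definition above) =====
theorem BOJ_9184_spec : Claim_equal_BOJ_9184 := by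
  intro a b c _
  unfold Spec_BOJ_9184 BOJ_9184
  rw [alt_eq_specVal]
  exact (pvGoA_correct 200 PySem.Dict.empty a b c
    (by unfold pvMu; split_ifs <;> omega)
    (by intro i j k v h; rw [PySem.Dict.get?_empty] at h; cases h)).1
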